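-- pv_equiv track=rewrite | github.com/hemabchowdary/data_engineering | src/exam_batch1.1.py | separate_and_sums
-- ===== SOURCE A (Python) =====
-- def separate_and_sums(lista):
--     even_list = [num for num in lista if num % 2 == 0]
--     odd_list = [num for num in lista if num % 2 != 0]
--
--     even_sum = sum(even_list)
--     odd_sum = sum(odd_list)
--
--     if even_sum >= odd_sum:
--         return even_list, even_sum
--     else:
--         return odd_list, odd_sum
-- ===== SOURCE B (Python) =====
-- def separate_and_sums(lista):
--     even_list, odd_list = [], []
--     even_sum, odd_sum = 0, 0
--     for num in lista:
--         if num % 2 == 0: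
--             even_list.append(num)
--             even_sum += num
--         else:
--             odd_list.append(num)
--             odd_sum += num
--     if even_sum >= odd_sum:
--         return even_list, even_sum
--     else:
--         return odd_list, odd_sum
-- ===== Notes on version B (the rewrite author's own statement) =====
-- stated objective: alternative
-- what changed: B replaces A's two filtering comprehensions plus two separate sum() passes with a single loop maintaining both lists and both running sums at once.
import Mathlib
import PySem

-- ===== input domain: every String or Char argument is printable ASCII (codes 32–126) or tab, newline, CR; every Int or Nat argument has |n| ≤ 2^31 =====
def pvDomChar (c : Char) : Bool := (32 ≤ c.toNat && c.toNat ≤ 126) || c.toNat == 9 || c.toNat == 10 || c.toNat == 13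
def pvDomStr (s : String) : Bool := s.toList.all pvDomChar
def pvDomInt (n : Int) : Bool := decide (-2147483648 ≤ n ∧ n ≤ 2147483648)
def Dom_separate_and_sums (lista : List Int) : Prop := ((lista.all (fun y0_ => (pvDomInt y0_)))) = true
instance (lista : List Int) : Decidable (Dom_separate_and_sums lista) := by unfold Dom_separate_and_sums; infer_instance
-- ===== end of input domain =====

-- B replaces A's two filtering comprehensions plus two separate sum() passes with one
-- loop accumulating both lists and both running sums (objective: alternative single-pass decomposition).

-- ===== PORT A =====
def separate_and_sums (lista : List Int) : List Int × Int :=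
  let even_list := lista.filter (fun num => PySem.Int.mod num 2 == 0)
  let odd_list := lista.filter (fun num => PySem.Int.mod num 2 != 0)
  let even_sum := even_list.sum
  let odd_sum := odd_list.sum
  if even_sum ≥ odd_sum then (even_list, even_sum) else (odd_list, odd_sum)

-- ===== PORT B =====
def separate_and_sums_alt (lista : List Int) : List Int × Int :=
  let st := lista.foldl
    (fun (s : List Int × List Int × Int × Int) num =>
      let (el, ol, es, os) := s
      if PySem.Int.mod num 2 == 0 then (el ++ [num], ol, es + num, os)
      else (el, ol ++ [num], es, os + num))
    ([], [], 0, 0)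
  let (el, ol, es, os) := st
  if es ≥ os then (el, es) else (ol, os)

-- ===== PRECONDITION & SPEC =====
def Spec_separate_and_sums (lista : List Int) (out : List Int × Int) : Prop := out = separate_and_sums_alt lista
instance (lista : List Int) (out : List Int × Int) : Decidable (Spec_separate_and_sums lista out) := by unfold Spec_separate_and_sums; infer_instance

-- ===== CLAIM (what is proved, stated in full; the proofs are below) =====
def Claim_equal_separate_and_sums : Prop := ∀ (lista : List Int), Dom_separate_and_sums lista → Spec_separate_and_sums lista (separate_and_sums lista)

-- ===== LEMMAS AND PROOFS =====

lemma separate_foldl_inv (lista : List Int) (el ol : List Int) (es os : Int) :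
    lista.foldl
      (fun (s : List Int × List Int × Int × Int) num =>
        let (el, ol, es, os) := s
        if PySem.Int.mod num 2 == 0 then (el ++ [num], ol, es + num, os)
        else (el, ol ++ [num], es, os + num))
      (el, ol, es, os)
    = (el ++ lista.filter (fun num => PySem.Int.mod num 2 == 0),
       ol ++ lista.filter (fun num => PySem.Int.mod num 2 != 0),
       es + (lista.filter (fun num => PySem.Int.mod num 2 == 0)).sum,
       os + (lista.filter (fun num => PySem.Int.mod num 2 != 0)).sum) := by
  induction lista generalizing el ol es os with
  | nil => simp
  | cons x xs ih =>
    cases hc : (PySem.Int.mod x 2 == 0)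
    · simp only [List.foldl_cons, List.filter_cons, hc, bne, Bool.not_false, if_false,
        Bool.false_eq_true, if_true, ite_true, ite_false, ih, Prod.mk.injEq]
      and_intros <;> first | trivial | (simp [List.sum_cons]; try ring)
    · simp only [List.foldl_cons, List.filter_cons, hc, bne, Bool.not_true, if_true,
        Bool.false_eq_true, if_false, ite_true, ite_false, ih, Prod.mk.injEq]
      and_intros <;> first | trivial | (simp [List.sum_cons]; try ring)

-- ===== VERDICT (by name: the statement is the Claim_ definition above) =====
theorem separate_and_sums_spec : Claim_equal_separate_and_sums := by
  intro lista _
  unfold Spec_separate_and_sums separate_and_sums separate_and_sums_alt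
  rw [separate_foldl_inv]
  simp
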